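/- GENERATED by farm/mkstatement.py from design/units.tsv (unit `digest_file.2`) and the assertions of Gif/Spec/Seg_digest_file.lean — do not edit.
   THE STATEMENT of the proof unit `digest_file.2`: segment 2 of `digest_file` (18 instructions; entries 0x10580b;
   exits 0x10585a; ranges 0x10580b-0x10585a)
   takes each of its entry assertions to one of its exit assertions (`Gif.Spec.digest_file.Seg2`), given the contracts of its callees.
   What the names mean: ProgX/Base/Spec/Basic.lean (the shared hypotheses), Gif/Spec/Seg_digest_file.lean (the assertions). The theorem to prove:
   `theorem digest_file_2_ok : Gif.Spec.digest_file_2.Statement`. -/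
import Gif.Code
import Gif.Dec.All
import Gif.Labels
import Gif.Spec.Driver
import Gif.Spec.Seg_digest_file
namespace Gif.Spec.digest_file_2
open X86 X86.User Asan

/-- The statement of unit `digest_file.2`. -/
def Statement : Prop :=
  ∀ (Lay : Layout) (_hLay : Lay.hi = 0x1000000) (μ : Microarch) (_hμ : UserX.MicroOK μ) (u₀ : State)
    (_hcode : HasCodeNat Lay u₀ Gif.L.digest_file.entry Gif.Code.code_digest_file.nat Gif.L.digest_file.size)
    (_h_digest_int : Calls Lay μ ProgX.Base.WayInv (ProgX.Base.conv u₀) Gif.L.digest_int.entry Gif.Spec.digest_int.spec)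
    (_h_asan_load4_noabort : Asan.SmallCheck Lay μ ProgX.Base.WayInv (ProgX.Base.CodeOK u₀) [.rax, .rcx, .rdx] 4 ProgX.Base.L.__asan_load4_noabort.entry)
    (_h_asan_load1_noabort : Asan.SmallCheck Lay μ ProgX.Base.WayInv (ProgX.Base.CodeOK u₀) [.rax, .rdx] 1 ProgX.Base.L.__asan_load1_noabort.entry),
    Gif.Spec.digest_file.Seg2 Lay μ u₀

end Gif.Spec.digest_file_2
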